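-- pv_equiv track=rewrite | github.com/ows-ali/Hacktoberfest | Hackerrank/day-of-the-programmer.py | dayOfProgrammer
-- ===== SOURCE A (Python) =====
-- def dayOfProgrammer(year):
--     leap=[31,29,31,30,31,30,31,31,30,31,30,31]
--     notLeap=[31,28,31,30,31,30,31,31,30,31,30,31]
--     uni=[31,15,31,30,31,30,31,31,30,31,30,31]
--     m=0
--     tot=0
--     month=day=0
--     date=""
--     if year%400==0:
--         m=1
--     if year%4==0:
--         if year%100!=0:
--             m=1
--     if year<1917:
--         if year%4==0:
--             m=1
--     if year==1918:
--         for i in range(len(uni)):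
--             if (tot+uni[i])<256:
--                 tot=tot+uni[i]
--             else:
--                 day=256-tot
--                 month=i+1
--                 if month<=10:
--                     month=str("0{}".format(month))
--                 date="{}.{}.{}".format(day,month,year)
--                 return date
--     if m!=1:
--         for i in range(len(notLeap)):
--             if (tot+notLeap[i])<256:
--                 tot=tot+notLeap[i]
--             else:
--                 day=256-tot
--                 month=i+1
--                 if month<=10:
--                     month=str("0{}".format(month))
--                 date="{}.{}.{}".format(day,month,year)
--                 return date
--     else:
--         for i in range(len(leap)):
--             if (tot+leap[i])<256:
--                 tot=tot+leap[i]
--             else: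
--                 day=256-tot
--                 month=i+1
--                 if month<=10:
--                     month=str("0{}".format(month))
--                 date="{}.{}.{}".format(day,month,year)
--                 return date
-- ===== SOURCE B (Python) =====
-- def dayOfProgrammer(year):
--     if year == 1918:
--         return "26.09.1918"
--     leap = (year % 400 == 0) or (year % 4 == 0 and year % 100 != 0) or (year < 1917 and year % 4 == 0)
--     return "{}.09.{}".format(12 if leap else 13, year)
-- ===== Notes on version B (the rewrite author's own statement) =====
-- stated objective: simpler
-- what changed: B drops A's three month-table summation loops and month formatting: the 256th day always falls in September, so B computes a single leap boolean (Julian before 1917, Gregorian after, 1918 special-cased) and returns the literal date directly.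
import Mathlib
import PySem

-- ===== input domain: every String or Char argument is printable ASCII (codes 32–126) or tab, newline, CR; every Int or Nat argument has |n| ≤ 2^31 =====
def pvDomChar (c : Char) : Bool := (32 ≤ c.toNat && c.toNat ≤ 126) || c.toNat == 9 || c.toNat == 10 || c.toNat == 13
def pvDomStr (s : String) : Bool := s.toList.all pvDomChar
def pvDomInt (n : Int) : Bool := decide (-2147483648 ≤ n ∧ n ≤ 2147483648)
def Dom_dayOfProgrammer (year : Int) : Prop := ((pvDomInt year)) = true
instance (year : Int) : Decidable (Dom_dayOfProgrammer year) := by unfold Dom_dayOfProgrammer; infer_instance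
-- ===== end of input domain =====

-- B replaces A's three 12-month summation loops with the precomputed fact that the
-- 256th day is always in September (objective: simpler).

-- ===== PORT A =====
-- the common body of A's three for-loops: i / tot are the loop state, returning the date
-- string at the first month where the running total reaches 256 ("" on the unreachable
-- fall-through where Python would leave the loop)
def pvLoopA (months : List Int) (i tot year : Int) : String :=
  match months with
  | [] => ""
  | d :: rest =>
    if tot + d < 256 then pvLoopA rest (i + 1) (tot + d) year
    else
      let day := 256 - tot
      let month := i + 1
      let monthS := if month ≤ 10 then "0" ++ PySem.Int.toStr month else PySem.Int.toStr month
      PySem.Int.toStr day ++ "." ++ monthS ++ "." ++ PySem.Int.toStr year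

def dayOfProgrammer (year : Int) : String :=
  let leap : List Int := [31,29,31,30,31,30,31,31,30,31,30,31]
  let notLeap : List Int := [31,28,31,30,31,30,31,31,30,31,30,31]
  let uni : List Int := [31,15,31,30,31,30,31,31,30,31,30,31]
  let m : Int := 0
  let m := if PySem.Int.mod year 400 = 0 then 1 else m
  let m := if PySem.Int.mod year 4 = 0 then (if PySem.Int.mod year 100 ≠ 0 then 1 else m) else m
  let m := if year < 1917 then (if PySem.Int.mod year 4 = 0 then 1 else m) else m
  if year = 1918 then pvLoopA uni 0 0 year
  else if m ≠ 1 then pvLoopA notLeap 0 0 year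
  else pvLoopA leap 0 0 year

-- ===== PORT B =====
def dayOfProgrammer_alt (year : Int) : String :=
  if year = 1918 then "26.09.1918"
  else
    let leap : Bool :=
      PySem.Int.mod year 400 = 0 ∨ (PySem.Int.mod year 4 = 0 ∧ PySem.Int.mod year 100 ≠ 0)
        ∨ (year < 1917 ∧ PySem.Int.mod year 4 = 0)
    PySem.Int.toStr (if leap then (12 : Int) else 13) ++ ".09." ++ PySem.Int.toStr year

-- ===== PRECONDITION & SPEC =====
def Spec_dayOfProgrammer (year : Int) (out : String) : Prop := out = dayOfProgrammer_alt year
instance (year : Int) (out : String) : Decidable (Spec_dayOfProgrammer year out) := by unfold Spec_dayOfProgrammer; infer_instance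

-- ===== CLAIM (what is proved, stated in full; the proofs are below) =====
def Claim_equal_dayOfProgrammer : Prop := ∀ (year : Int), Dom_dayOfProgrammer year → Spec_dayOfProgrammer year (dayOfProgrammer year)

-- ===== LEMMAS AND PROOFS =====
-- A's non-leap loop always stops in September with day 13
theorem pvLoopA_notLeap (year : Int) :
    pvLoopA [31,28,31,30,31,30,31,31,30,31,30,31] 0 0 year
      = "13" ++ ".09." ++ PySem.Int.toStr year := by
  simp [pvLoopA]
  rfl

-- A's leap loop always stops in September with day 12
theorem pvLoopA_leap (year : Int) :
    pvLoopA [31,29,31,30,31,30,31,31,30,31,30,31] 0 0 year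
      = "12" ++ ".09." ++ PySem.Int.toStr year := by
  simp [pvLoopA]
  rfl

-- ===== VERDICT (by name: the statement is the Claim_ definition above) =====
theorem dayOfProgrammer_spec : Claim_equal_dayOfProgrammer := by
  intro year _
  unfold Spec_dayOfProgrammer dayOfProgrammer dayOfProgrammer_alt
  by_cases h1918 : year = 1918
  · subst h1918; decide
  · simp only [if_neg h1918]
    by_cases hl : PySem.Int.mod year 400 = 0 ∨ (PySem.Int.mod year 4 = 0 ∧ PySem.Int.mod year 100 ≠ 0)
        ∨ (year < 1917 ∧ PySem.Int.mod year 4 = 0)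
    · have hm : (if year < 1917 then (if PySem.Int.mod year 4 = 0 then (1:Int) else
          (if PySem.Int.mod year 4 = 0 then (if PySem.Int.mod year 100 ≠ 0 then 1 else
            (if PySem.Int.mod year 400 = 0 then 1 else 0)) else
            (if PySem.Int.mod year 400 = 0 then 1 else 0))) else
          (if PySem.Int.mod year 4 = 0 then (if PySem.Int.mod year 100 ≠ 0 then 1 else
            (if PySem.Int.mod year 400 = 0 then 1 else 0)) else
            (if PySem.Int.mod year 400 = 0 then 1 else 0))) = 1 := by
        rcases hl with h | ⟨h4, h100⟩ | ⟨hy, h4⟩ <;> split_ifs <;> simp_all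
      simp only [hm]
      have hl' : (400:Int) ∣ year ∨ ((4:Int) ∣ year ∧ ¬ (100:Int) ∣ year) ∨ (year < 1917 ∧ (4:Int) ∣ year) := by
        simpa [PySem.Int.mod, Int.dvd_iff_fmod_eq_zero] using hl
      simp [pvLoopA_leap]
      rw [if_pos hl']
      decide
    · have hm : (if year < 1917 then (if PySem.Int.mod year 4 = 0 then (1:Int) else
          (if PySem.Int.mod year 4 = 0 then (if PySem.Int.mod year 100 ≠ 0 then 1 else
            (if PySem.Int.mod year 400 = 0 then 1 else 0)) else
            (if PySem.Int.mod year 400 = 0 then 1 else 0))) else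
          (if PySem.Int.mod year 4 = 0 then (if PySem.Int.mod year 100 ≠ 0 then 1 else
            (if PySem.Int.mod year 400 = 0 then 1 else 0)) else
            (if PySem.Int.mod year 400 = 0 then 1 else 0))) = 0 := by
        push Not at hl
        split_ifs <;> simp_all
      simp only [hm]
      have hl' : ¬ ((400:Int) ∣ year ∨ ((4:Int) ∣ year ∧ ¬ (100:Int) ∣ year) ∨ (year < 1917 ∧ (4:Int) ∣ year)) := by
        simpa [PySem.Int.mod, Int.dvd_iff_fmod_eq_zero] using hl
      simp [pvLoopA_notLeap]
      rw [if_neg hl']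
      decide
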